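-- pv_equiv track=rewrite | github.com/wuyaqiang/Algorithm_Learn | 剑指Offer/MyCode/No_57.py | continuous_positive_sum_1
-- ===== SOURCE A (Python) =====
-- def continuous_positive_sum_1(target):
--     '''
--     和为 s 的连续正数序列
--     剑指 Offer 解法，该解法在 leetcode 上运行超时
--     '''
--     if target < 3:
--         return 1
--     count = 1
--     l, r, mid = 1, 2, (target + 1) // 2
--     cur_sum = l + r
--     while l < mid:
--         if cur_sum == target:
--             count += 1
--         while cur_sum > target and l < mid:
--             cur_sum -= l
--             l += 1
--             if cur_sum == target:
--                 count += 1
--         r += 1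
--         cur_sum += r
--     return count
-- ===== SOURCE B (Python) =====
-- def continuous_positive_sum_1(target):
--     # Enumerate sequence lengths k >= 2 with k*(k+1)//2 <= target and check
--     # divisibility, instead of sliding a two-pointer window: O(sqrt(target)).
--     if target < 3:
--         return 1
--     count = 1
--     k = 2
--     while k * (k + 1) // 2 <= target:
--         if (target - k * (k + 1) // 2) % k == 0:
--             count += 1
--         k += 1
--     return count
-- ===== Notes on version B (the rewrite author's own statement) =====
-- stated objective: faster
-- what changed: Replaces A's O(target) two-pointer sliding window over start/end positions by an O(sqrt(target)) enumeration of sequence lengths k with k(k+1)/2 <= target, counting k when k divides target - k(k+1)/2.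
import Mathlib
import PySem

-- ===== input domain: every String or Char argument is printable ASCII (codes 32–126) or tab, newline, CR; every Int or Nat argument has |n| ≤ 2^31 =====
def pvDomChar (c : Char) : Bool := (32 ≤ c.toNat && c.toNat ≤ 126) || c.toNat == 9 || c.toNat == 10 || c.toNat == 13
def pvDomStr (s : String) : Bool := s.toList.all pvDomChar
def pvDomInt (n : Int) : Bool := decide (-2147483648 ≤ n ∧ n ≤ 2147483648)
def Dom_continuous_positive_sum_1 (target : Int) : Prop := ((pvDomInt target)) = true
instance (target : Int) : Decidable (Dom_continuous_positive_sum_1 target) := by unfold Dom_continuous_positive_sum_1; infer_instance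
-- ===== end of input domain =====

-- B replaces A's O(target) two-pointer sliding window by an O(√target) enumeration of
-- sequence lengths k with k(k+1)/2 ≤ target and a divisibility test (objective: faster).
-- The `fuel` parameters below only make the while-loops total; the proofs below show the
-- chosen fuel is never exhausted, so each port computes exactly what its Python computes.

-- ===== PORT A =====
-- inner `while cur_sum > target and l < mid:` loop; state (l, cur_sum, count);
-- each iteration increases l, so (mid - l).toNat iterations are enough fuel
def aInner (fuel : Nat) (target mid l s c : Int) : Int × Int × Int :=
  match fuel with
  | 0 => (l, s, c)
  | f + 1 =>
    if s > target ∧ l < mid then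
      -- cur_sum -= l ; l += 1 ; if cur_sum == target: count += 1
      aInner f target mid (l + 1) (s - l) (if s - l = target then c + 1 else c)
    else (l, s, c)

-- outer `while l < mid:` loop
def aOuter (fuel : Nat) (target mid l r s c : Int) : Int :=
  match fuel with
  | 0 => c
  | f + 1 =>
    if l < mid then
      -- if cur_sum == target: count += 1 ; then the inner while loop
      -- r += 1 ; cur_sum += r
      aOuter f target mid
        (aInner (mid - l).toNat target mid l s (if s = target then c + 1 else c)).1 (r + 1)
        ((aInner (mid - l).toNat target mid l s (if s = target then c + 1 else c)).2.1 + (r + 1))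
        (aInner (mid - l).toNat target mid l s (if s = target then c + 1 else c)).2.2
    else c

def continuous_positive_sum_1 (target : Int) : Int :=
  if target < 3 then 1
  else
    -- count = 1 ; l, r, mid = 1, 2, (target + 1) // 2 ; cur_sum = l + r
    aOuter ((PySem.Int.floordiv (target + 1) 2 - 1).toNat * (target + 4).toNat + target.toNat + 1)
      target (PySem.Int.floordiv (target + 1) 2) 1 2 3 1

-- ===== PORT B =====
-- `while k * (k + 1) // 2 <= target:` loop; k stays ≤ target while the condition holds,
-- so (target - 1).toNat + 1 iterations are enough fuel
def bLoop (fuel : Nat) (target k c : Int) : Int :=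
  match fuel with
  | 0 => c
  | f + 1 =>
    if PySem.Int.floordiv (k * (k + 1)) 2 ≤ target then
      bLoop f target (k + 1)
        (if PySem.Int.mod (target - PySem.Int.floordiv (k * (k + 1)) 2) k = 0 then c + 1 else c)
    else c

def continuous_positive_sum_1_alt (target : Int) : Int :=
  if target < 3 then 1
  else bLoop ((target - 1).toNat + 1) target 2 1

-- ===== PRECONDITION & SPEC =====
def Spec_continuous_positive_sum_1 (target : Int) (out : Int) : Prop := out = continuous_positive_sum_1_alt target
instance (target : Int) (out : Int) : Decidable (Spec_continuous_positive_sum_1 target out) := by unfold Spec_continuous_positive_sum_1; infer_instance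

-- ===== CLAIM (what is proved, stated in full; the proofs are below) =====
def Claim_equal_continuous_positive_sum_1 : Prop := ∀ (target : Int), Dom_continuous_positive_sum_1 target → Spec_continuous_positive_sum_1 target (continuous_positive_sum_1 target)

-- ===== LEMMAS AND PROOFS =====

-- a computable Finset.Icc on ℤ
def IccInt (a b : Int) : Finset Int :=
  (Finset.range ((b + 1 - a).toNat)).map ⟨fun n : ℕ => a + (n : Int), fun _ _ h => by simpa using h⟩

theorem mem_IccInt (a b x : Int) : x ∈ IccInt a b ↔ a ≤ x ∧ x ≤ b := by
  simp only [IccInt, Finset.mem_map, Finset.mem_range, Function.Embedding.coeFn_mk]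
  constructor
  · rintro ⟨n, hn, rfl⟩; omega
  · intro h; exact ⟨(x - a).toNat, by omega, by omega⟩

-- decompositions of t as a sum of ≥ 2 consecutive positive integers, indexed by
-- (first, last) = (l, r); note 2 * (l + (l+1) + ⋯ + r) = r*r + r + l - l*l
def Pairs (t : Int) : Finset (Int × Int) :=
  (IccInt 1 t ×ˢ IccInt 1 t).filter
    (fun p => p.1 < p.2 ∧ 2 * t = p.2 * p.2 + p.2 + p.1 - p.1 * p.1)

-- the same decompositions indexed by their length k = r - l + 1
def Ks (t : Int) : Finset Int :=
  (IccInt 2 t).filter (fun k => k * (k + 1) ≤ 2 * t ∧ (2 * t - k * k - k) % (2 * k) = 0)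

def Slice (t r a b : Int) : Finset (Int × Int) :=
  (Pairs t).filter (fun p => p.2 = r ∧ a ≤ p.1 ∧ p.1 ≤ b)

def Rem (t l r : Int) : Finset (Int × Int) :=
  (Pairs t).filter (fun p => r < p.2 ∨ (p.2 = r ∧ l ≤ p.1))

theorem mem_Pairs (t : Int) (p : Int × Int) :
    p ∈ Pairs t ↔ 1 ≤ p.1 ∧ p.1 < p.2 ∧ p.2 ≤ t ∧ 2 * t = p.2 * p.2 + p.2 + p.1 - p.1 * p.1 := by
  simp only [Pairs, Finset.mem_filter, Finset.mem_product, mem_IccInt]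
  constructor
  · rintro ⟨⟨h1, h2⟩, h3, h4⟩; exact ⟨h1.1, h3, h2.2, h4⟩
  · rintro ⟨h1, h2, h3, h4⟩
    exact ⟨⟨⟨h1, by omega⟩, ⟨by omega, h3⟩⟩, h2, h4⟩

theorem mem_Ks (t : Int) (k : Int) :
    k ∈ Ks t ↔ 2 ≤ k ∧ k ≤ t ∧ k * (k + 1) ≤ 2 * t ∧ 2 * k ∣ 2 * t - k * k - k := by
  simp only [Ks, Finset.mem_filter, mem_IccInt]
  constructor
  · rintro ⟨⟨h1, h2⟩, h3, h4⟩
    exact ⟨h1, h2, h3, Int.dvd_of_emod_eq_zero h4⟩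
  · rintro ⟨h1, h2, h3, h4⟩
    exact ⟨⟨h1, h2⟩, h3, Int.emod_eq_zero_of_dvd h4⟩

theorem mem_Slice (t r a b : Int) (p : Int × Int) :
    p ∈ Slice t r a b ↔ p ∈ Pairs t ∧ p.2 = r ∧ a ≤ p.1 ∧ p.1 ≤ b := by
  simp [Slice, Finset.mem_filter]

theorem mem_Rem (t l r : Int) (p : Int × Int) :
    p ∈ Rem t l r ↔ p ∈ Pairs t ∧ (r < p.2 ∨ (p.2 = r ∧ l ≤ p.1)) := by
  simp [Rem, Finset.mem_filter]

theorem Slice_empty (t r a b : Int) (h : b < a) : (Slice t r a b).card = 0 := by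
  rw [Finset.card_eq_zero]
  ext p
  simp only [mem_Slice, Finset.notMem_empty, iff_false]
  rintro ⟨-, -, h1, h2⟩; omega

theorem Slice_split (t r a b : Int) (hab : a ≤ b) :
    (Slice t r a b).card = (if (a, r) ∈ Pairs t then 1 else 0) + (Slice t r (a + 1) b).card := by
  by_cases hmem : (a, r) ∈ Pairs t
  · have he : Slice t r a b = insert (a, r) (Slice t r (a + 1) b) := by
      ext p
      simp only [mem_Slice, Finset.mem_insert]
      constructor
      · rintro ⟨hp, h2, h3, h4⟩
        by_cases hpa : p.1 = a
        · left; have : p = (a, r) := by rw [← hpa, ← h2]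
          exact this
        · right; exact ⟨hp, h2, by omega, h4⟩
      · rintro (rfl | ⟨hp, h2, h3, h4⟩)
        · exact ⟨hmem, rfl, le_refl a, hab⟩
        · exact ⟨hp, h2, by omega, h4⟩
    rw [he, Finset.card_insert_of_notMem (by simp only [mem_Slice]; rintro ⟨-, -, h3, -⟩; omega)]
    simp [hmem]; omega
  · have he : Slice t r a b = Slice t r (a + 1) b := by
      ext p
      simp only [mem_Slice]
      constructor
      · rintro ⟨hp, h2, h3, h4⟩
        by_cases hpa : p.1 = a
        · exfalso; apply hmem
          have : p = (a, r) := by rw [← hpa, ← h2]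
          rwa [this] at hp
        · exact ⟨hp, h2, by omega, h4⟩
      · rintro ⟨hp, h2, h3, h4⟩; exact ⟨hp, h2, by omega, h4⟩
    rw [he]; simp [hmem]

-- a window (a, r) with doubled sum 2s' is a decomposition iff s' = t
theorem hit_iff (t mid r a s' : Int) (hs : 2 * s' = r * r + r + a - a * a)
    (h2 : 1 ≤ a) (h3 : a ≤ r) (ham : a ≤ mid) (hm2 : 2 * mid ≤ t + 1) (ht : 3 ≤ t) :
    ((a, r) ∈ Pairs t) ↔ s' = t := by
  rw [mem_Pairs]
  constructor
  · rintro ⟨-, -, -, h4⟩; simp only at h4; linarith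
  · intro hst
    have har : a ≠ r := by
      intro he
      rw [he] at hs
      have : s' = r := by linarith
      omega
    have hrt : r ≤ t := by
      nlinarith [mul_nonneg (by omega : (0:Int) ≤ r - a) (by omega : (0:Int) ≤ r + a - 1)]
    refine ⟨h2, by omega, hrt, ?_⟩
    simp only
    linarith

-- no decomposition with last = r starts strictly right of a start whose window sum is already ≤ t
theorem no_pair_right (t r L : Int) (p : Int × Int) (hp : p ∈ Pairs t)
    (hpr : p.2 = r) (hpL : L < p.1) (h2 : 1 ≤ L)
    (hle : 2 * t ≥ r * r + r + L - L * L) : False := by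
  rw [mem_Pairs] at hp
  obtain ⟨q1, q2, q3, q4⟩ := hp
  rw [hpr] at q2 q4
  nlinarith [mul_pos (by omega : (0:Int) < p.1 - L) (by omega : (0:Int) < p.1 + L - 1)]

-- no decomposition starts at ≥ mid, since 2*t ≥ 4*start + 2 and t ≤ 2*mid
theorem no_pair_big (t mid : Int) (p : Int × Int) (hp : p ∈ Pairs t)
    (hpm : mid ≤ p.1) (hm1 : t ≤ 2 * mid) : False := by
  rw [mem_Pairs] at hp
  obtain ⟨q1, q2, q3, q4⟩ := hp
  nlinarith [mul_nonneg (by omega : (0:Int) ≤ p.2 - p.1 - 1) (by omega : (0:Int) ≤ p.2 + p.1 + 1)]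

-- no decomposition with last ≥ R starts weakly left of a point whose window already overshoots
theorem no_pair_left (t R L : Int) (p : Int × Int) (hp : p ∈ Pairs t)
    (hpr : R ≤ p.2) (hpL : p.1 ≤ L - 1) (hI : 2 * t < R * R + R + (L - 1) - (L - 1) * (L - 1))
    (hR : 1 ≤ R) : False := by
  rw [mem_Pairs] at hp
  obtain ⟨q1, q2, q3, q4⟩ := hp
  nlinarith [mul_nonneg (by omega : (0:Int) ≤ p.2 - R) (by omega : (0:Int) ≤ p.2 + R + 1),
    mul_nonneg (by omega : (0:Int) ≤ L - 1 - p.1) (by omega : (0:Int) ≤ p.1 + L - 2)]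

-- invariants of the inner loop, provided it is given enough fuel
theorem aInner_basic (fuel : Nat) (target mid r l s c : Int) (hf : (mid - l).toNat ≤ fuel)
    (h1 : 2 * s = r * r + r + l - l * l) (h2 : 1 ≤ l) (h3 : l ≤ r) (hmt : mid ≤ target) :
    l ≤ (aInner fuel target mid l s c).1 ∧
    (aInner fuel target mid l s c).1 ≤ max l mid ∧
    (aInner fuel target mid l s c).1 ≤ r ∧
    2 * (aInner fuel target mid l s c).2.1 =
      r * r + r + (aInner fuel target mid l s c).1 -
        (aInner fuel target mid l s c).1 * (aInner fuel target mid l s c).1 ∧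
    ¬((aInner fuel target mid l s c).2.1 > target ∧ (aInner fuel target mid l s c).1 < mid) ∧
    ((aInner fuel target mid l s c).1 = l ∨
      2 * target < r * r + r + ((aInner fuel target mid l s c).1 - 1) -
        ((aInner fuel target mid l s c).1 - 1) * ((aInner fuel target mid l s c).1 - 1)) := by
  induction fuel generalizing l s c with
  | zero =>
    simp only [aInner]
    exact ⟨le_refl l, le_max_left l mid, h3, h1, by omega, by simp⟩
  | succ f ih =>
    rw [aInner]
    split
    case isTrue h =>
      have hlr : l < r := by
        by_cases he : l = r
        · subst he; exfalso; have : 2 * s = 2 * l := by linarith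
          omega
        · omega
      have key := ih (l + 1) (s - l) (if s - l = target then c + 1 else c)
        (by omega) (by linear_combination h1) (by omega) (by omega)
      have hmx : max (l + 1) mid = mid := max_eq_right (by omega)
      have hmx2 : max l mid = mid := max_eq_right (by omega)
      rw [hmx] at key
      rw [hmx2]
      refine ⟨by omega, key.2.1, key.2.2.1, key.2.2.2.1, key.2.2.2.2.1, ?_⟩
      rcases key.2.2.2.2.2 with he | hb
      · right; rw [he]; simp only [add_sub_cancel_right]; linarith [h.1]
      · right; exact hb
    case isFalse h =>
      exact ⟨le_refl l, le_max_left l mid, h3, h1, h, Or.inl rfl⟩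

-- counting of the inner loop: it adds one for each decomposition ending at r starting in (l, l']
theorem aInner_count (fuel : Nat) (target mid r l s c : Int) (hf : (mid - l).toNat ≤ fuel)
    (h1 : 2 * s = r * r + r + l - l * l) (h2 : 1 ≤ l) (h3 : l ≤ r)
    (hm1 : target ≤ 2 * mid) (hm2 : 2 * mid ≤ target + 1) (ht : 3 ≤ target) :
    (aInner fuel target mid l s c).2.2 =
      c + (Slice target r (l + 1) (aInner fuel target mid l s c).1).card := by
  induction fuel generalizing l s c with
  | zero =>
    simp only [aInner]
    rw [Slice_empty target r (l + 1) l (by omega)]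
    simp
  | succ f ih =>
    rw [aInner]
    split
    case isTrue h =>
      have hlr : l < r := by
        by_cases he : l = r
        · subst he; exfalso; have : 2 * s = 2 * l := by linarith
          omega
        · omega
      have hb := aInner_basic f target mid r (l + 1) (s - l) (if s - l = target then c + 1 else c)
        (by omega) (by linear_combination h1) (by omega) (by omega) (by omega)
      have key := ih (l + 1) (s - l) (if s - l = target then c + 1 else c)
        (by omega) (by linear_combination h1) (by omega) (by omega)
      rw [key]
      have hhit : ((l + 1, r) ∈ Pairs target) ↔ s - l = target :=
        hit_iff target mid r (l + 1) (s - l) (by linear_combination h1) (by omega) (by omega)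
          (by omega) hm2 ht
      rw [Slice_split target r (l + 1) ((aInner f target mid (l + 1) (s - l)
        (if s - l = target then c + 1 else c)).1) (by have := hb.1; omega)]
      by_cases hc : s - l = target
      · rw [if_pos hc, if_pos (hhit.2 hc)]; push_cast; ring
      · rw [if_neg hc, if_neg (fun hm => hc (hhit.1 hm))]; push_cast; ring
    case isFalse h =>
      rw [Slice_empty target r (l + 1) l (by omega)]
      simp

-- one outer step consumes exactly the decompositions ending at r that start at ≥ l
theorem Rem_step (t mid l r L S : Int)
    (hS : 2 * S = r * r + r + L - L * L)
    (h2 : 1 ≤ l) (hlL : l ≤ L) (hLr : L ≤ r)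
    (hexit : ¬(S > t ∧ L < mid))
    (hI3' : L = 1 ∨ 2 * t < (r + 1) * (r + 1) + (r + 1) + (L - 1) - (L - 1) * (L - 1))
    (hm1 : t ≤ 2 * mid) :
    (Rem t l r).card = (Slice t r l L).card + (Rem t L (r + 1)).card := by
  rw [← Finset.card_union_of_disjoint]
  · congr 1
    ext p
    simp only [mem_Rem, Finset.mem_union, mem_Slice]
    constructor
    · rintro ⟨hp, hr⟩
      rcases hr with hgt | ⟨he, hge⟩
      · by_cases he1 : p.2 = r + 1
        · right; refine ⟨hp, Or.inr ⟨he1, ?_⟩⟩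
          by_contra hlt
          rcases hI3' with rfl | hI
          · rw [mem_Pairs] at hp; omega
          · exact no_pair_left t (r + 1) L p hp (by omega) (by omega) hI (by omega)
        · right; exact ⟨hp, Or.inl (by omega)⟩
      · left
        refine ⟨hp, he, hge, ?_⟩
        by_contra hgt
        rcases not_and_or.1 hexit with hle | hge2
        · exact no_pair_right t r L p hp he (by omega) (by omega) (by omega)
        · exact no_pair_big t mid p hp (by omega) hm1
    · rintro (⟨hp, he, hge, -⟩ | ⟨hp, hr⟩)
      · exact ⟨hp, Or.inr ⟨he, hge⟩⟩
      · rcases hr with hgt | ⟨he, hge⟩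
        · exact ⟨hp, Or.inl (by omega)⟩
        · exact ⟨hp, Or.inl (by omega)⟩
  · rw [Finset.disjoint_left]
    intro p hp hq
    rw [mem_Slice] at hp
    rw [mem_Rem] at hq
    rcases hq.2 with hgt | ⟨he, -⟩
    · omega
    · omega

theorem Rem_done (t mid r l : Int) (hl : l = mid)
    (hI3 : l = 1 ∨ 2 * t < r * r + r + (l - 1) - (l - 1) * (l - 1))
    (hm1 : t ≤ 2 * mid) (ht : 3 ≤ t) (hr2 : 2 ≤ r) :
    (Rem t l r).card = 0 := by
  have hm : 2 ≤ l := by omega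
  rw [Finset.card_eq_zero]
  ext p
  simp only [mem_Rem, Finset.notMem_empty, iff_false]
  rintro ⟨hp, hr⟩
  rcases hI3 with h1 | hI
  · omega
  rcases hr with hgt | ⟨he, hge⟩
  · by_cases hp1 : p.1 ≤ l - 1
    · exact no_pair_left t r l p hp (by omega) hp1 hI (by omega)
    · exact no_pair_big t mid p hp (by omega) hm1
  · exact no_pair_big t mid p hp (by omega) hm1

-- the outer loop's termination measure decreases across one iteration
theorem aOuter_dec (target mid l r L S s : Int) (hl : l < mid) (ht : 3 ≤ target)
    (h1 : 2 * s = r * r + r + l - l * l) (h2 : 1 ≤ l) (h3 : l ≤ r) (h4 : 2 ≤ r)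
    (hb1 : l ≤ L) (hb2 : L ≤ mid) (hb3 : L ≤ r)
    (hb4 : 2 * S = r * r + r + L - L * L) (hb5 : ¬(S > target ∧ L < mid)) :
    (mid - L).toNat * (target + 4).toNat + (target + 2 - (r + 1)).toNat <
      (mid - l).toNat * (target + 4).toNat + (target + 2 - r).toNat := by
  by_cases hL : L = l
  · have hsle : S ≤ target := by
      by_contra hgt; exact hb5 ⟨by omega, by omega⟩
    rw [hL] at hb4
    have hSs : S = s := by linarith
    have hrs : r ≤ s := by nlinarith [mul_nonneg (sub_nonneg.2 h3) (by omega : (0:Int) ≤ r + l - 1)]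
    rw [hL]
    exact Nat.add_lt_add_left (by omega) _
  · have ha : (mid - L).toNat + 1 ≤ (mid - l).toNat := by omega
    have hx : (target + 2 - (r + 1)).toNat < (target + 4).toNat := by omega
    calc (mid - L).toNat * (target + 4).toNat + (target + 2 - (r + 1)).toNat
        < (mid - L).toNat * (target + 4).toNat + (target + 4).toNat := Nat.add_lt_add_left hx _
      _ = ((mid - L).toNat + 1) * (target + 4).toNat := by ring
      _ ≤ (mid - l).toNat * (target + 4).toNat := Nat.mul_le_mul_right _ ha
      _ ≤ (mid - l).toNat * (target + 4).toNat + (target + 2 - r).toNat := Nat.le_add_right _ _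

-- the outer loop counts every decomposition not yet passed, provided it has enough fuel
theorem aOuter_eq (fuel : Nat) (target mid l r s c : Int)
    (hf : (mid - l).toNat * (target + 4).toNat + (target + 2 - r).toNat < fuel)
    (ht : 3 ≤ target) (hm1 : target ≤ 2 * mid) (hm2 : 2 * mid ≤ target + 1)
    (h1 : 2 * s = r * r + r + l - l * l) (h2 : 1 ≤ l) (h3 : l ≤ r) (h4 : 2 ≤ r)
    (hI3 : l = 1 ∨ 2 * target < r * r + r + (l - 1) - (l - 1) * (l - 1))
    (hlm : l ≤ mid) :
    aOuter fuel target mid l r s c = c + (Rem target l r).card := by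
  induction fuel generalizing l r s c with
  | zero => omega
  | succ f ih =>
    rw [aOuter]
    split
    case isTrue hl =>
      have hb := aInner_basic (mid - l).toNat target mid r l s
        (if s = target then c + 1 else c) le_rfl h1 h2 h3 (by omega)
      obtain ⟨hb1, hb2, hb3, hb4, hb5, hb6⟩ := hb
      rw [max_eq_right (le_of_lt hl)] at hb2
      have hI3' : (aInner (mid - l).toNat target mid l s (if s = target then c + 1 else c)).1 = 1 ∨
          2 * target < (r + 1) * (r + 1) + (r + 1) +
            ((aInner (mid - l).toNat target mid l s (if s = target then c + 1 else c)).1 - 1) -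
            ((aInner (mid - l).toNat target mid l s (if s = target then c + 1 else c)).1 - 1) *
            ((aInner (mid - l).toNat target mid l s (if s = target then c + 1 else c)).1 - 1) := by
        rcases hb6 with he | hI
        · rw [he]
          rcases hI3 with h1' | hI
          · left; exact h1'
          · right; nlinarith
        · right; nlinarith
      have hdec := aOuter_dec target mid l r
        ((aInner (mid - l).toNat target mid l s (if s = target then c + 1 else c)).1)
        ((aInner (mid - l).toNat target mid l s (if s = target then c + 1 else c)).2.1)
        s hl ht h1 h2 h3 h4 hb1 hb2 hb3 hb4 hb5
      have key := ih
        ((aInner (mid - l).toNat target mid l s (if s = target then c + 1 else c)).1) (r + 1)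
        ((aInner (mid - l).toNat target mid l s (if s = target then c + 1 else c)).2.1 + (r + 1))
        ((aInner (mid - l).toNat target mid l s (if s = target then c + 1 else c)).2.2)
        (Nat.lt_of_lt_of_le hdec (Nat.le_of_lt_succ hf))
        (by linear_combination hb4) (by omega) (by omega) (by omega) hI3' (by omega)
      rw [key]
      have hcount := aInner_count (mid - l).toNat target mid r l s
        (if s = target then c + 1 else c) le_rfl h1 h2 h3 hm1 hm2 ht
      rw [hcount]
      have hhit : ((l, r) ∈ Pairs target) ↔ s = target :=
        hit_iff target mid r l s h1 h2 h3 (by omega) hm2 ht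
      have hsplit := Slice_split target r l
        ((aInner (mid - l).toNat target mid l s (if s = target then c + 1 else c)).1) hb1
      have hrem := Rem_step target mid l r
        ((aInner (mid - l).toNat target mid l s (if s = target then c + 1 else c)).1)
        ((aInner (mid - l).toNat target mid l s (if s = target then c + 1 else c)).2.1)
        hb4 h2 hb1 hb3 hb5 hI3' hm1
      rw [hrem, hsplit]
      by_cases hc : s = target
      · rw [if_pos hc, if_pos (hhit.2 hc)]; push_cast; ring
      · rw [if_neg hc, if_neg (fun hm => hc (hhit.1 hm))]; push_cast; ring
    case isFalse hl =>
      rw [Rem_done target mid r l (by omega) hI3 hm1 ht h4]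
      simp

theorem A_eq_card (target : Int) (ht : 3 ≤ target) :
    continuous_positive_sum_1 target = 1 + (Pairs target).card := by
  rw [continuous_positive_sum_1]
  rw [if_neg (by omega : ¬ target < 3)]
  have hm2 : 2 * PySem.Int.floordiv (target + 1) 2 ≤ target + 1 := by
    have := (PySem.Int.le_floordiv_iff_mul_le
      (a := target + 1) (b := 2) (q := PySem.Int.floordiv (target + 1) 2) (by omega)).1 le_rfl
    omega
  have hm1 : target ≤ 2 * PySem.Int.floordiv (target + 1) 2 := by
    have := (PySem.Int.floordiv_lt_iff_lt_mul
      (a := target + 1) (b := 2) (q := PySem.Int.floordiv (target + 1) 2 + 1) (by omega)).1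
      (by omega)
    omega
  rw [aOuter_eq _ target (PySem.Int.floordiv (target + 1) 2) 1 2 3 1 ?hf (by omega) hm1 hm2
    (by ring) (by omega) (by omega) (by omega) (Or.inl rfl) (by omega)]
  case hf =>
    have he : ((target : Int) + 2 - 2).toNat = target.toNat := by omega
    rw [he]
    exact Nat.lt_succ_self _
  congr 1
  rw [show Rem target 1 2 = Pairs target from ?_]
  ext p
  simp only [mem_Rem, and_iff_left_iff_imp]
  intro hp
  rw [mem_Pairs] at hp
  omega

-- counting of B's loop, provided it has enough fuel
theorem bLoop_eq (fuel : Nat) (target k c : Int) (hf : (target + 1 - k).toNat < fuel)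
    (hk : 2 ≤ k) (ht : 3 ≤ target) :
    bLoop fuel target k c = c + ((Ks target).filter (fun k' => k ≤ k')).card := by
  induction fuel generalizing k c with
  | zero => omega
  | succ f ih =>
    rw [bLoop]
    split
    case isTrue hc =>
      have hkf : k ≤ PySem.Int.floordiv (k * (k + 1)) 2 := by
        rw [PySem.Int.le_floordiv_iff_mul_le (by omega)]
        nlinarith
      obtain ⟨m, hm⟩ : Even (k * (k + 1)) := Int.even_mul_succ_self k
      have hfd : PySem.Int.floordiv (k * (k + 1)) 2 = m := by
        rw [PySem.Int.floordiv_eq_iff_of_pos (by omega)]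
        omega
      have hkt : k ≤ target := by omega
      have hcond : (PySem.Int.mod (target - PySem.Int.floordiv (k * (k + 1)) 2) k = 0)
          ↔ k ∈ Ks target := by
        rw [hfd, PySem.Int.mod_eq_zero_iff_dvd, mem_Ks]
        constructor
        · intro hdvd
          refine ⟨hk, hkt, by omega, ?_⟩
          have h2 : (2 : Int) * k ∣ 2 * (target - m) := mul_dvd_mul_left 2 hdvd
          have he : 2 * (target - m) = 2 * target - k * k - k := by linear_combination hm
          rwa [he] at h2
        · rintro ⟨-, -, -, hdvd⟩
          have he : 2 * target - k * k - k = 2 * (target - m) := by linear_combination -1 * hm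
          rw [he] at hdvd
          exact (mul_dvd_mul_iff_left (by norm_num : (2:Int) ≠ 0)).1 hdvd
      have key := ih (k + 1)
        (if PySem.Int.mod (target - PySem.Int.floordiv (k * (k + 1)) 2) k = 0 then c + 1 else c)
        (by omega) (by omega)
      rw [key]
      have hsplit : ((Ks target).filter (fun k' => k ≤ k')).card =
          (if k ∈ Ks target then 1 else 0) + ((Ks target).filter (fun k' => k + 1 ≤ k')).card := by
        by_cases hmem : k ∈ Ks target
        · have he : (Ks target).filter (fun k' => k ≤ k') =
              insert k ((Ks target).filter (fun k' => k + 1 ≤ k')) := by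
            ext k'
            simp only [Finset.mem_filter, Finset.mem_insert]
            constructor
            · rintro ⟨hmem', hle⟩
              by_cases hke : k' = k
              · exact Or.inl hke
              · exact Or.inr ⟨hmem', by omega⟩
            · rintro (rfl | ⟨hmem', hle⟩)
              · exact ⟨hmem, le_rfl⟩
              · exact ⟨hmem', by omega⟩
          rw [he, Finset.card_insert_of_notMem
            (by simp only [Finset.mem_filter]; rintro ⟨-, hle⟩; omega)]
          simp [hmem]; omega
        · have he : (Ks target).filter (fun k' => k ≤ k') =
              (Ks target).filter (fun k' => k + 1 ≤ k') := by
            ext k'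
            simp only [Finset.mem_filter]
            constructor
            · rintro ⟨hmem', hle⟩
              refine ⟨hmem', ?_⟩
              by_cases hke : k' = k
              · exact absurd (hke ▸ hmem') hmem
              · omega
            · rintro ⟨hmem', hle⟩; exact ⟨hmem', by omega⟩
          rw [he]; simp [hmem]
      rw [hsplit]
      by_cases hcc : PySem.Int.mod (target - PySem.Int.floordiv (k * (k + 1)) 2) k = 0
      · rw [if_pos hcc, if_pos (hcond.1 hcc)]; push_cast; ring
      · rw [if_neg hcc, if_neg (fun hm' => hcc (hcond.2 hm'))]; push_cast; ring
    case isFalse hc =>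
      have hge : (target + 1) * 2 ≤ k * (k + 1) := by
        rw [← PySem.Int.le_floordiv_iff_mul_le (by omega)]
        omega
      have he : (Ks target).filter (fun k' => k ≤ k') = ∅ := by
        ext k'
        simp only [Finset.mem_filter, Finset.notMem_empty, iff_false, not_and]
        intro hmem hle
        rw [mem_Ks] at hmem
        obtain ⟨q1, -, q3, -⟩ := hmem
        nlinarith
      rw [he]
      simp

theorem B_eq_card (target : Int) (ht : 3 ≤ target) :
    continuous_positive_sum_1_alt target = 1 + (Ks target).card := by
  rw [continuous_positive_sum_1_alt, if_neg (by omega : ¬ target < 3)]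
  rw [bLoop_eq _ target 2 1 (by omega) (by omega) ht]
  congr 1
  rw [Finset.filter_true_of_mem]
  intro k hk
  rw [mem_Ks] at hk
  omega

-- the bijection (l, r) ↦ k = r - l + 1 between the two indexings
theorem card_Pairs_eq_card_Ks (t : Int) : (Pairs t).card = (Ks t).card := by
  apply Finset.card_bij (fun p _ => p.2 - p.1 + 1)
  · intro p hp
    rw [mem_Pairs] at hp
    obtain ⟨h1, h2, h3, h4⟩ := hp
    rw [mem_Ks]
    refine ⟨by omega, by omega, by nlinarith, ⟨p.1 - 1, by linear_combination h4⟩⟩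
  · intro p hp q hq he
    rw [mem_Pairs] at hp hq
    obtain ⟨p1, p2, p3, p4⟩ := hp
    obtain ⟨q1, q2, q3, q4⟩ := hq
    have hk : p.2 - p.1 = q.2 - q.1 := by omega
    have h1 : p.1 = q.1 := by nlinarith
    have h2 : p.2 = q.2 := by omega
    exact Prod.ext h1 h2
  · intro k hk
    rw [mem_Ks] at hk
    obtain ⟨h1, h2, h3, ⟨d, hd⟩⟩ := hk
    have hd0 : 0 ≤ d := by nlinarith
    refine ⟨(d + 1, d + k), ?_, by ring⟩
    rw [mem_Pairs]
    refine ⟨by omega, by omega, by nlinarith, by linear_combination hd⟩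

-- ===== VERDICT (by name: the statement is the Claim_ definition above) =====
theorem continuous_positive_sum_1_spec : Claim_equal_continuous_positive_sum_1 := by
  intro target _
  unfold Spec_continuous_positive_sum_1
  by_cases ht : target < 3
  · simp [continuous_positive_sum_1, continuous_positive_sum_1_alt, ht]
  · rw [A_eq_card target (by omega), B_eq_card target (by omega), card_Pairs_eq_card_Ks]
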